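-- pv_equiv track=rewrite | github.com/dee-sakwe/CODEPATH | Unit1_Advanced.py | defuse
-- ===== SOURCE A (Python) =====
-- def defuse(code, k):
--     # for easy access
--     n = len(code)
--     # initialize result array since all the work has to be done simultaneoulsy
--     result = [0] * n
--
--     if k > 0:
--         # for all chars in the array
--         for i in range(n):
--             # maintain a total count that is appended to our result array
--             # at position i
--             total = 0
--             # tricky part! Thank you @copilot
--             # for the number of chars we are supposed to add
--             # e.g if k is 3, we want to add the first, second, and third numbers after code[i]
--             for j in range(1, k+1):
--                 # use the modulo operator to simulate the circular array
--                 # e.g n = 4, i = 0 , j = 1; idx would be (0 + 1) % 4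
--                 # which would come out to 1
--                 idx = (i + j) % n
--                 # so we would add the int at code[idx] to our total
--                 total += code[idx]
--
--             # add the total sum to result at the index i
--             result[i] = total
--     elif k < 0:
--         for i in range(n):
--             # similar to the case where k is positive
--             total = 0
--             # had to come up with this by myself, tho lmao
--             # really tough
--             for j in range(1, abs(k) + 1 ):  # assume k is positive so we know what to add
--                 # e.g n = 7, k = 3, i = 0, j = [1, 2, 3]
--                 # i tried to do this by "adding" another array of size n to our input array
--                 # this allows us to go back without using negative indices, assuming k < n
--                 # idx = ((0 + 7) - j = 1) % 7
--                 # idx = (7 - 1) % 7 => 6;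
--                 idx = ((i + n) - j) % n
--                 # We then add code[6] to total
--                 total += code[idx]
--
--             result[i] = total
--     # return result. will return [0] * n if k == 0
--     # actually just make code = result and return that
--     code = result
--     return code
-- ===== SOURCE B (Python) =====
-- def defuse(code, k):
--     # Sliding window over the circular array: full cycles of the window
--     # contribute (|k| // n) * sum(code); the remaining r = |k| % n elements
--     # form a window whose running sum is updated in O(1) per index.
--     n = len(code)
--     if n == 0 or k == 0:
--         return [0] * n
--     m = abs(k)
--     q, r = divmod(m, n)
--     s = 1 if k > 0 else -m
--     w = q * sum(code) + sum(code[(s + t) % n] for t in range(r))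
--     result = []
--     for _ in range(n):
--         result.append(w)
--         w += code[(s + r) % n] - code[s % n]
--         s += 1
--     return result
-- ===== Notes on version B (the rewrite author's own statement) =====
-- stated objective: faster
-- what changed: Replaced A's per-index inner loop over all |k| neighbours by a single sliding window whose running sum is updated with one add and one subtract per index.
import Mathlib
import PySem

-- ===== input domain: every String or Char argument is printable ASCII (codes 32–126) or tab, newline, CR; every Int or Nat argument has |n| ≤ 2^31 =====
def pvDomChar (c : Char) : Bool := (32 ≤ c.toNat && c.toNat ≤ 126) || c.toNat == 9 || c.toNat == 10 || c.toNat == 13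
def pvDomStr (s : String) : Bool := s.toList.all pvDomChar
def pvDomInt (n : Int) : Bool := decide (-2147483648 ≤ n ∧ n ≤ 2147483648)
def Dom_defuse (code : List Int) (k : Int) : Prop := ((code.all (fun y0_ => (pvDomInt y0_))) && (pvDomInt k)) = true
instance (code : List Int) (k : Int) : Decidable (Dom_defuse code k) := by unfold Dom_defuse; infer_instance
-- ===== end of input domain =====

-- B replaces A's fresh O(|k|) inner loop per index by a sliding window updated in O(1) per index.

-- ===== PORT A =====
-- code[idx] is ported as pyGetD … 0: idx = (…) % n is always in range 0..n-1 where it is evaluated, so this is exact.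
def defuse (code : List Int) (k : Int) : List Int :=
  if k > 0 then
    (PySem.List.pyRange 0 (code.length : Int) 1).foldl (fun res i =>
      PySem.List.pySetD res i
        ((PySem.List.pyRange 1 (k + 1) 1).foldl (fun total j =>
          total + PySem.List.pyGetD code (PySem.Int.mod (i + j) (code.length : Int)) 0) 0))
      (List.replicate code.length 0)
  else if k < 0 then
    (PySem.List.pyRange 0 (code.length : Int) 1).foldl (fun res i =>
      PySem.List.pySetD res i
        ((PySem.List.pyRange 1 (|k| + 1) 1).foldl (fun total j =>
          total + PySem.List.pyGetD code (PySem.Int.mod ((i + (code.length : Int)) - j) (code.length : Int)) 0) 0))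
      (List.replicate code.length 0)
  else List.replicate code.length 0

-- ===== PORT B =====
-- the 'for _ in range(n)' loop of Source B: state (w, s), appends w each iteration (cons builds in iteration order)
def defuseLoop (code : List Int) (n m : Int) : Nat → Int → Int → List Int
  | 0, _, _ => []
  | cnt + 1, w, s =>
    w :: defuseLoop code n m cnt
      (w + PySem.List.pyGetD code (PySem.Int.mod (s + m) n) 0
         - PySem.List.pyGetD code (PySem.Int.mod s n) 0) (s + 1)

def defuse_alt (code : List Int) (k : Int) : List Int :=
  if code.length = 0 ∨ k = 0 then List.replicate code.length 0
  else
    let m : Int := |k|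
    let q : Int := PySem.Int.floordiv m (code.length : Int)
    let r : Int := PySem.Int.mod m (code.length : Int)
    let s : Int := if k > 0 then 1 else -m
    defuseLoop code (code.length : Int) r code.length
      (q * code.sum + ((List.range r.toNat).map
        (fun t : Nat => PySem.List.pyGetD code (PySem.Int.mod (s + (t : Int)) (code.length : Int)) 0)).sum) s

-- ===== PRECONDITION & SPEC =====
def Spec_defuse (code : List Int) (k : Int) (out : List Int) : Prop := out = defuse_alt code k
instance (code : List Int) (k : Int) (out : List Int) : Decidable (Spec_defuse code k out) := by unfold Spec_defuse; infer_instance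

-- ===== CLAIM (what is proved, stated in full; the proofs are below) =====
def Claim_equal_defuse : Prop := ∀ (code : List Int) (k : Int), Dom_defuse code k → Spec_defuse code k (defuse code k)

-- ===== LEMMAS AND PROOFS =====

-- circular access and window sum used to characterise both ports
def gIdx (code : List Int) (s : Int) : Int :=
  PySem.List.pyGetD code (PySem.Int.mod s (code.length : Int)) 0

def Wsum (code : List Int) (s : Int) : Nat → Int
  | 0 => 0
  | c + 1 => Wsum code s c + gIdx code (s + (c : Int))

lemma Wsum_succ (code : List Int) (s : Int) (c : Nat) :
    Wsum code s (c + 1) = Wsum code s c + gIdx code (s + (c : Int)) := rfl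

lemma gIdx_def (code : List Int) (s : Int) :
    gIdx code s = PySem.List.pyGetD code (PySem.Int.mod s (code.length : Int)) 0 := rfl

lemma gIdx_period (code : List Int) (s : Int) :
    gIdx code (s + (code.length : Int)) = gIdx code s := by
  unfold gIdx
  rcases Nat.eq_zero_or_pos code.length with h | h
  · simp [h]
  · have hp : (0 : Int) < (code.length : Int) := by exact_mod_cast h
    rw [PySem.Int.mod_eq_emod_of_pos hp, PySem.Int.mod_eq_emod_of_pos hp, Int.add_emod_right]

lemma Wsum_succ_front (code : List Int) (s : Int) (c : Nat) :
    Wsum code s (c + 1) = gIdx code s + Wsum code (s + 1) c := by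
  induction c generalizing s with
  | zero => simp [Wsum]
  | succ c ih =>
    conv_lhs => rw [Wsum_succ, ih]
    conv_rhs => rw [Wsum_succ]
    push_cast
    rw [show s + ((c : Int) + 1) = s + 1 + (c : Int) by ring]
    ring

lemma Wsum_period (code : List Int) (s : Int) (c : Nat) :
    Wsum code (s + (code.length : Int)) c = Wsum code s c := by
  induction c with
  | zero => rfl
  | succ c ih =>
    rw [Wsum_succ, Wsum_succ, ih]
    have : s + (code.length : Int) + (c : Int) = s + (c : Int) + (code.length : Int) := by ring
    rw [this, gIdx_period]

lemma sum_range_eq_Wsum (code : List Int) (s : Int) (c : Nat) :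
    ((List.range c).map (fun t : Nat => gIdx code (s + (t : Int)))).sum = Wsum code s c := by
  induction c with
  | zero => rfl
  | succ c ih =>
    rw [List.range_succ, List.map_append, List.sum_append, ih, Wsum_succ]
    simp

lemma defuseLoop_eq (code : List Int) (C : Int) (mm : Nat) :
    ∀ (cnt : Nat) (s : Int),
      defuseLoop code (code.length : Int) (mm : Int) cnt (C + Wsum code s mm) s
        = (List.range cnt).map (fun i : Nat => C + Wsum code (s + (i : Int)) mm) := by
  intro cnt
  induction cnt with
  | zero => intro s; rfl
  | succ cnt ih =>
    intro s
    have hw : C + Wsum code s mm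
        + PySem.List.pyGetD code (PySem.Int.mod (s + (mm : Int)) (code.length : Int)) 0
        - PySem.List.pyGetD code (PySem.Int.mod s (code.length : Int)) 0
        = C + Wsum code (s + 1) mm := by
      have h1 : Wsum code s (mm + 1) = Wsum code s mm + gIdx code (s + (mm : Int)) := rfl
      have h2 := Wsum_succ_front code s mm
      rw [h1] at h2
      unfold gIdx at h2
      omega
    show (C + Wsum code s mm) :: defuseLoop code (code.length : Int) (mm : Int) cnt _ (s + 1) = _
    rw [hw, ih (s + 1), List.range_succ_eq_map, List.map_cons, List.map_map]
    congr 1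
    · simp
    · apply List.map_congr_left
      intro i _
      simp only [Function.comp]
      congr 2
      push_cast; ring

lemma Wsum_shift (code : List Int) (x : Int) (c : Nat) :
    Wsum code (x + 1) c = Wsum code x c + gIdx code (x + (c : Int)) - gIdx code x := by
  have h1 := Wsum_succ code x c
  have h2 := Wsum_succ_front code x c
  omega

lemma Wsum_full_invariant (code : List Int) :
    ∀ (x : Int), Wsum code x code.length = Wsum code 0 code.length := by
  intro x
  induction x using Int.induction_on with
  | zero => rfl
  | succ n ih =>
    rw [Wsum_shift, gIdx_period, ih]
    ring
  | pred n ih =>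
    have := Wsum_shift code (-(n : Int) - 1) code.length
    rw [show -(n : Int) - 1 + 1 = -(n : Int) by ring, gIdx_period] at this
    rw [← ih, this]
    ring

lemma range_map_getD (code : List Int) :
    (List.range code.length).map (fun t : Nat => gIdx code ((0 : Int) + (t : Int))) = code := by
  apply List.ext_getElem
  · simp
  · intro i h1 h2
    simp only [List.getElem_map, List.getElem_range]
    unfold gIdx
    rw [show (0 : Int) + (i : Int) = ((i : Nat) : Int) by ring, PySem.Int.mod_natCast,
      Nat.mod_eq_of_lt (by simpa using h2), PySem.List.pyGetD_natCast]
    exact List.getD_eq_getElem code 0 (by simpa using h2)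

lemma Wsum_any_full (code : List Int) (x : Int) :
    Wsum code x code.length = code.sum := by
  rw [Wsum_full_invariant, ← sum_range_eq_Wsum, range_map_getD]

lemma Wsum_append (code : List Int) (s : Int) (a : Nat) :
    ∀ (b : Nat), Wsum code s (a + b) = Wsum code s a + Wsum code (s + (a : Int)) b := by
  intro b
  induction b with
  | zero => simp [Wsum]
  | succ b ih =>
    rw [show a + (b + 1) = (a + b) + 1 by ring, Wsum_succ, ih, Wsum_succ]
    push_cast
    ring

lemma Wsum_add_full (code : List Int) (s : Int) (c : Nat) :
    Wsum code s (c + code.length) = Wsum code s c + code.sum := by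
  rw [Wsum_append, Wsum_any_full]

lemma Wsum_decompose (code : List Int) (R : Nat) (s : Int) :
    ∀ (Q : Nat), Wsum code s (R + Q * code.length) = (Q : Int) * code.sum + Wsum code s R := by
  intro Q
  induction Q with
  | zero => simp
  | succ Q ih =>
    rw [show R + (Q + 1) * code.length = (R + Q * code.length) + code.length by ring,
      Wsum_add_full, ih]
    push_cast
    ring

lemma Wsum_mod_div (code : List Int) (M : Nat) (x : Int) :
    Wsum code x M = ((M / code.length : Nat) : Int) * code.sum + Wsum code x (M % code.length) := by
  rw [← Wsum_decompose]
  congr 1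
  exact (Nat.mod_add_div' M code.length).symm

lemma foldl_inner_pos (code : List Int) (b : Int) :
    ∀ (c : Nat) (t0 : Int),
      (PySem.List.pyRange 1 ((c : Int) + 1) 1).foldl
        (fun total j => total + gIdx code (b + j)) t0
      = t0 + Wsum code (b + 1) c := by
  intro c
  induction c with
  | zero =>
    intro t0
    rw [show ((0 : Nat) : Int) + 1 = 1 by norm_num, PySem.List.pyRange_one_eq_nil (by norm_num)]
    simp [Wsum]
  | succ c ih =>
    intro t0
    have hsplit : PySem.List.pyRange 1 ((((c : Nat) + 1 : Nat) : Int) + 1) 1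
        = PySem.List.pyRange 1 ((c : Int) + 1) 1 ++ [(c : Int) + 1] := by
      push_cast
      rw [show (c : Int) + 1 + 1 = ((c : Int) + 1) + 1 by ring]
      exact PySem.List.pyRange_one_succ_right (by omega)
    rw [hsplit, List.foldl_append, ih]
    simp only [List.foldl_cons, List.foldl_nil]
    rw [Wsum_succ]
    unfold gIdx
    rw [show b + ((c : Int) + 1) = b + 1 + (c : Int) by ring]
    ring

lemma foldl_inner_neg (code : List Int) (b : Int) :
    ∀ (c : Nat) (t0 : Int),
      (PySem.List.pyRange 1 ((c : Int) + 1) 1).foldl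
        (fun total j => total + gIdx code (b - j)) t0
      = t0 + Wsum code (b - (c : Int)) c := by
  intro c
  induction c with
  | zero =>
    intro t0
    rw [show ((0 : Nat) : Int) + 1 = 1 by norm_num, PySem.List.pyRange_one_eq_nil (by norm_num)]
    simp [Wsum]
  | succ c ih =>
    intro t0
    have hsplit : PySem.List.pyRange 1 ((((c : Nat) + 1 : Nat) : Int) + 1) 1
        = PySem.List.pyRange 1 ((c : Int) + 1) 1 ++ [(c : Int) + 1] := by
      push_cast
      rw [show (c : Int) + 1 + 1 = ((c : Int) + 1) + 1 by ring]
      exact PySem.List.pyRange_one_succ_right (by omega)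
    rw [hsplit, List.foldl_append, ih]
    simp only [List.foldl_cons, List.foldl_nil]
    have h2 := Wsum_succ_front code (b - ((c : Int) + 1)) c
    rw [show b - ((c : Int) + 1) + 1 = b - (c : Int) by ring] at h2
    have : Wsum code (b - (((c : Nat) + 1 : Nat) : Int)) (c + 1)
        = gIdx code (b - ((c : Int) + 1)) + Wsum code (b - (c : Int)) c := by
      push_cast at h2 ⊢
      rw [← h2]
    rw [this]
    unfold gIdx
    ring

-- A's outer loop: result[i] = f i for each i, starting from a list of the right length
lemma setAll (f : Nat → Int) :
    ∀ (c : Nat) (res : List Int), c ≤ res.length →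
      (List.range c).foldl (fun r i => r.set i (f i)) res
        = (List.range c).map f ++ res.drop c := by
  intro c
  induction c with
  | zero => intro res _; simp
  | succ c ih =>
    intro res h
    rw [List.range_succ, List.foldl_append, List.map_append, ih res (by omega)]
    simp only [List.foldl_cons, List.foldl_nil]
    have hlen : ((List.range c).map f).length = c := by simp
    have hset : (res.drop c).set 0 (f c) = f c :: res.drop (c + 1) := by
      rw [List.drop_eq_getElem_cons (show c < res.length by omega)]
      rfl
    rw [List.set_append_right _ _ (by omega), hlen, Nat.sub_self, hset, List.append_assoc]
    rfl

-- A's branch folds rewritten as a map over List.range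
lemma branch_eq (code : List Int) (f : Int → Int) :
    (PySem.List.pyRange 0 (code.length : Int) 1).foldl
      (fun res i => PySem.List.pySetD res i (f i)) (List.replicate code.length 0)
    = (List.range code.length).map (fun i : Nat => f (i : Int)) := by
  rw [PySem.List.pyRange_zero_nat, List.foldl_map]
  simp only [PySem.List.pySetD_natCast]
  rw [setAll (fun i => f (i : Int)) code.length _ (by simp)]
  simp

-- ===== VERDICT (by name: the statement is the Claim_ definition above) =====
theorem defuse_spec : Claim_equal_defuse := by
  intro code k _
  unfold Spec_defuse defuse defuse_alt
  rcases lt_trichotomy k 0 with hk | hk | hk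
  · -- k < 0
    rw [if_neg (by omega : ¬ k > 0), if_pos hk]
    by_cases hn : code.length = 0
    · rw [if_pos (Or.inl hn), show ((code.length : Int)) = 0 by exact_mod_cast hn,
        PySem.List.pyRange_one_eq_nil (by norm_num : (0:Int) ≤ 0)]
      rfl
    · rw [if_neg (show ¬ (code.length = 0 ∨ k = 0) by omega)]
      simp only []
      rw [if_neg (by omega : ¬ k > 0)]
      have hmm : |k| = (((-k).toNat : Nat) : Int) := by rw [abs_of_neg hk]; omega
      rw [hmm]
      simp only [← gIdx_def]
      simp only [PySem.Int.floordiv_natCast, PySem.Int.mod_natCast, Int.toNat_natCast]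
      rw [branch_eq, sum_range_eq_Wsum,
        defuseLoop_eq code ((((-k).toNat / code.length : Nat) : Int) * code.sum)
          ((-k).toNat % code.length) code.length (-(((-k).toNat : Nat) : Int))]
      apply List.map_congr_left
      intro i _
      rw [foldl_inner_neg code ((i : Int) + (code.length : Int)) (-k).toNat 0,
        Wsum_mod_div code (-k).toNat]
      rw [show (i : Int) + (code.length : Int) - (((-k).toNat : Nat) : Int)
          = (-(((-k).toNat : Nat) : Int) + (i : Int)) + (code.length : Int) by ring, Wsum_period]
      ring
  · -- k = 0
    subst hk
    simp
  · -- k > 0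
    rw [if_pos hk]
    by_cases hn : code.length = 0
    · rw [if_pos (Or.inl hn), show ((code.length : Int)) = 0 by exact_mod_cast hn,
        PySem.List.pyRange_one_eq_nil (by norm_num : (0:Int) ≤ 0)]
      rfl
    · rw [if_neg (show ¬ (code.length = 0 ∨ k = 0) by omega)]
      simp only []
      rw [if_pos hk]
      have hmm : |k| = ((k.toNat : Nat) : Int) := by rw [abs_of_pos hk]; omega
      rw [hmm]
      simp only [← gIdx_def]
      rw [show k + 1 = ((k.toNat : Nat) : Int) + 1 by omega]
      simp only [PySem.Int.floordiv_natCast, PySem.Int.mod_natCast, Int.toNat_natCast]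
      rw [branch_eq, sum_range_eq_Wsum,
        defuseLoop_eq code (((k.toNat / code.length : Nat) : Int) * code.sum)
          (k.toNat % code.length) code.length 1]
      apply List.map_congr_left
      intro i _
      rw [foldl_inner_pos code (i : Int) k.toNat 0, Wsum_mod_div code k.toNat]
      rw [show (i : Int) + 1 = 1 + (i : Int) by ring]
      ring
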